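-- pv_equiv track=rewrite | github.com/JassonRM/Hamming | conversion.py | deciBCD
-- ===== SOURCE A (Python) =====
-- def deciBCD (decimal):
--     BCDtot=''
--     i=0
--     while i<len(str(decimal)):
--         numero=int(str(decimal)[i])
--         BCDinv=''
--         BCD=''
--         flag=True
--         if numero==1: #si es un 1 lo agrega directamente a la variable inversa
--             BCDinv=BCDinv+str(numero)
--         else:
--             while flag:  #realiza las divisiones hasta que el resultado sea 1 y agrega los residuos a la variable
--                 binari=str(numero%2)
--                 numero=numero//2
--                 BCDinv=BCDinv+binari
--                 if numero==1 or numero == 0: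
--                     BCDinv=BCDinv+str(numero)
--                     flag=False
--         if len(BCDinv)<4: #si se guardan menos de 4 números, rellena con ceros
--             while len(BCDinv)<4:
--                 BCDinv=BCDinv+'0'
--         n=len(BCDinv)-1
--         while n>=0: # invierte la variable
--             BCD=BCD+BCDinv[n]
--             n=n-1
--         BCDtot=BCDtot+BCD
--         i+=1
--     return BCDtot
-- ===== SOURCE B (Python) =====
-- def deciBCD(decimal):
--     return ''.join(format(int(c), '04b') for c in str(decimal))
-- ===== Notes on version B (the rewrite author's own statement) =====
-- stated objective: simpler
-- what changed: Replaces A's per-digit remainder-division loop, zero-padding loop and manual reversal loop with a single join of format(int(c), '04b') over the digits of str(decimal), a closed-form 4-bit conversion.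
import Mathlib
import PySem

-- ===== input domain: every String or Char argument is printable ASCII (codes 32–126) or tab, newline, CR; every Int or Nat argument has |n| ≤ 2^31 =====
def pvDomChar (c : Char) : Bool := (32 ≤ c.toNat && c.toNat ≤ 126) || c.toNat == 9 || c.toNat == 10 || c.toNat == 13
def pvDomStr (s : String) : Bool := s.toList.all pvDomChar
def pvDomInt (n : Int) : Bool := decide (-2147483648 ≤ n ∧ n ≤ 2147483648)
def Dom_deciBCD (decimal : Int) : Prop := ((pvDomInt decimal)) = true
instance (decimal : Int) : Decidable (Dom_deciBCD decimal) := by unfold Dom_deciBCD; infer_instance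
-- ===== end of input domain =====

-- B replaces A's per-digit remainder/division loop, zero-padding loop and manual reversal loop
-- with a closed-form 4-bit conversion of each decimal digit, joined.

-- ===== PORT A =====
-- the inner 'while flag' loop: repeated n % 2 / n // 2, appending residues; fuel 4 suffices
-- for every value numero takes here (0 ≤ numero ≤ 9 needs at most 3 iterations)
def pvAInner : Nat → Int → List Char → List Char
  | 0, _, inv => inv
  | fuel+1, numero, inv =>
      let binari := PySem.Int.toChars (PySem.Int.mod numero 2)
      let numero' := PySem.Int.floordiv numero 2
      let inv' := inv ++ binari
      if numero' = 1 ∨ numero' = 0 then inv' ++ PySem.Int.toChars numero'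
      else pvAInner fuel numero' inv'

-- the padding 'while len(BCDinv)<4' loop (at most 3 appends; fuel 4)
def pvAPad : Nat → List Char → List Char
  | 0, inv => inv
  | fuel+1, inv => if inv.length < 4 then pvAPad fuel (inv ++ ['0']) else inv

-- the reversal loop: n from len-1 down to 0, BCD = BCD + BCDinv[n]
def pvARev (inv : List Char) : List Char :=
  (PySem.List.pyRange ((inv.length : Int) - 1) (-1) (-1)).foldl
    (fun acc n => acc ++ [PySem.List.pyGetD inv n ' ']) []

-- one iteration of the outer while loop (one character of str(decimal));
-- int(str(decimal)[i]) raises only when decimal < 0 ('-'), excluded by Pre_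
def pvADigit (c : Char) : List Char :=
  let numero := (PySem.Int.ofChars? [c]).getD 0
  let inv := if numero = 1 then [] ++ PySem.Int.toChars numero else pvAInner 4 numero []
  pvARev (pvAPad 4 inv)

def deciBCD (decimal : Int) : String :=
  String.ofList ((PySem.Int.toChars decimal).foldl (fun acc c => acc ++ pvADigit c) [])

-- ===== PORT B =====
-- port of format(n, '04b'): exact for 0 ≤ n < 16, the values int(c) takes here
def pvBBit (n : Int) : Char := if PySem.Int.band n 1 = 1 then '1' else '0'

def pvBin4 (n : Int) : List Char :=
  [pvBBit (n >>> 3), pvBBit (n >>> 2), pvBBit (n >>> 1), pvBBit n]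

def pvBDigit (c : Char) : List Char := pvBin4 ((PySem.Int.ofChars? [c]).getD 0)

def deciBCD_alt (decimal : Int) : String :=
  String.ofList ((PySem.Int.toChars decimal).flatMap pvBDigit)

-- ===== PRECONDITION & SPEC =====
-- Python A (and B) raise ValueError on int('-') when decimal < 0; nothing else is excluded.
def Pre_deciBCD (decimal : Int) : Prop := 0 ≤ decimal
instance (decimal : Int) : Decidable (Pre_deciBCD decimal) := by unfold Pre_deciBCD; infer_instance
def pvWitness_deciBCD : Int := (907)

def Spec_deciBCD (decimal : Int) (out : String) : Prop := out = deciBCD_alt decimal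
instance (decimal : Int) (out : String) : Decidable (Spec_deciBCD decimal out) := by unfold Spec_deciBCD; infer_instance

-- ===== CLAIM (what is proved, stated in full; the proofs are below) =====
def Claim_equal_deciBCD : Prop := ∀ (decimal : Int), Dom_deciBCD decimal → Pre_deciBCD decimal → Spec_deciBCD decimal (deciBCD decimal)

-- ===== LEMMAS AND PROOFS =====
def pvDigits10 : List Char := ['0','1','2','3','4','5','6','7','8','9']

lemma pv_digitChar_mem (m : Nat) (h : m < 10) : Nat.digitChar m ∈ pvDigits10 := by
  interval_cases m <;> decide

lemma pv_toDigitsCore_mem : ∀ (f m : Nat) (acc : List Char),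
    (∀ c ∈ acc, c ∈ pvDigits10) → ∀ c ∈ Nat.toDigitsCore 10 f m acc, c ∈ pvDigits10 := by
  intro f
  induction f with
  | zero => intro m acc hacc c hc; exact hacc c hc
  | succ f ih =>
      intro m acc hacc c hc
      simp only [Nat.toDigitsCore] at hc
      by_cases h : m / 10 = 0
      · simp only [h] at hc
        rcases List.mem_cons.mp hc with h1 | h1
        · exact h1 ▸ pv_digitChar_mem _ (Nat.mod_lt _ (by norm_num))
        · exact hacc c h1
      · simp only [h] at hc
        refine ih (m / 10) _ ?_ c hc
        intro d hd
        rcases List.mem_cons.mp hd with h1 | h1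
        · exact h1 ▸ pv_digitChar_mem _ (Nat.mod_lt _ (by norm_num))
        · exact hacc d h1

lemma pv_toChars_mem (n : Int) (hn : 0 ≤ n) : ∀ c ∈ PySem.Int.toChars n, c ∈ pvDigits10 := by
  intro c hc
  unfold PySem.Int.toChars at hc
  rw [if_neg (by omega)] at hc
  exact pv_toDigitsCore_mem _ _ [] (by simp) c hc

lemma pv_digit_eq (c : Char) (hc : c ∈ pvDigits10) : pvADigit c = pvBDigit c := by
  fin_cases hc <;> decide

-- ===== VERDICT (by name: the statement is the Claim_ definition above) =====
theorem deciBCD_spec : Claim_equal_deciBCD := by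
  intro decimal _ hpre
  unfold Spec_deciBCD deciBCD deciBCD_alt
  rw [PySem.List.foldl_append_eq_flatMap pvADigit (PySem.Int.toChars decimal) []]
  simp only [List.nil_append]
  congr 1
  apply List.flatMap_congr
  intro x hx
  exact pv_digit_eq x (pv_toChars_mem decimal hpre x hx)
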